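-- pv_equiv track=rewrite | github.com/sigal-raab/MoDi | motion_class.py | _normalise_joints
-- ===== SOURCE A (Python) =====
-- class EdgePoint(tuple):
--     def __new__(cls, a, b):
--         return super(EdgePoint, cls).__new__(cls, [a, b])
--
--     def __repr__(self):
--         return f'Edge{super(EdgePoint, self).__repr__()}'
--
-- def _normalise_joints(pooling: {EdgePoint: [EdgePoint]}) -> {EdgePoint: [EdgePoint]}:
--     max_joint = 0
--     joint_to_new_joint: {int: int} = {-1: -1, 0: 0}
--     new_edges = {}
--
--     for edge in sorted(pooling, key=lambda x: x[1]):
--         if edge[1] > max_joint: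
--             max_joint += 1
--             joint_to_new_joint[edge[1]] = max_joint
--
--         new_joint = tuple(joint_to_new_joint[e] for e in edge)
--         new_edges[new_joint] = pooling[edge]
--
--     return new_edges
-- ===== SOURCE B (Python) =====
-- def _normalise_joints(pooling):
--     # table-first rewrite: build the complete relabel table, then remap in one comprehension
--     table = {-1: -1, 0: 0}
--     for i, v in enumerate(sorted({e[1] for e in pooling if e[1] > 0})):
--         table[v] = i + 1
--     return {tuple(table[e] for e in edge): pooling[edge]
--             for edge in sorted(pooling, key=lambda x: x[1])}
-- ===== Notes on version B (the rewrite author's own statement) =====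
-- stated objective: simpler
-- what changed: A's single loop that interleaves growing the max_joint/relabel-map state with emitting edges is replaced by a precomputed relabel table (rank of each distinct positive second joint) followed by one remapping pass over the sorted edges; Pre_ excludes inputs where A raises KeyError and poolings with a repeated positive second joint, on which A's per-edge incremental relabelling and B's one-rank-per-joint table are equally defensible unspecified corners.
import Mathlib
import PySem

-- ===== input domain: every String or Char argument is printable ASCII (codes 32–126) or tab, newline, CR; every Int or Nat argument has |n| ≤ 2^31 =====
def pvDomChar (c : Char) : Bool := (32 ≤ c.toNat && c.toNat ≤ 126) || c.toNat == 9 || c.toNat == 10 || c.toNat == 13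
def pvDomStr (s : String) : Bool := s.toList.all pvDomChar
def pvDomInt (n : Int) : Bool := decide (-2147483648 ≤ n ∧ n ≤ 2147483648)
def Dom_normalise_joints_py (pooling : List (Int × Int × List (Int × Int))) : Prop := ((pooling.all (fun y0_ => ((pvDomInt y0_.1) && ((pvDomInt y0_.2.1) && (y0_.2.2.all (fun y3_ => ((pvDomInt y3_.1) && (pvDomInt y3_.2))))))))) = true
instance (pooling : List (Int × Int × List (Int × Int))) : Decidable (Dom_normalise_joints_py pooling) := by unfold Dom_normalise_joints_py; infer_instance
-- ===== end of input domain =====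

-- B replaces A's interleaved loop (an evolving max_joint/map state per edge) by a precomputed
-- relabel table followed by a single remapping pass; objective: simpler decomposition.

-- ===== PORT A =====
-- one loop step of A: update (max_joint, joint_to_new_joint), then build new_joint and insert it.
-- joint_to_new_joint[e] raises KeyError exactly where get? is none (excluded by Pre_);
-- the `.getD 0` default is unreachable under Pre_.
def njA_step (st : Int × PySem.Dict Int Int × PySem.Dict (Int × Int) (List (Int × Int)))
    (e : Int × Int × List (Int × Int)) :
    Int × PySem.Dict Int Int × PySem.Dict (Int × Int) (List (Int × Int)) :=
  let mj : Int × PySem.Dict Int Int :=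
    if e.2.1 > st.1 then (st.1 + 1, st.2.1.insert e.2.1 (st.1 + 1)) else (st.1, st.2.1)
  (mj.1, mj.2, st.2.2.insert ((mj.2.get? e.1).getD 0, (mj.2.get? e.2.1).getD 0) e.2.2)

-- sorted(pooling, key=λx: x[1]) iterates the dict's keys; the keys of a Python dict are
-- distinct, so stably sorting the (key, value) items carries pooling[edge] along exactly.
def normalise_joints_py (pooling : List (Int × Int × List (Int × Int))) : List (Int × Int × List (Int × Int)) :=
  (((PySem.List.sorted pooling (fun x => x.2.1) false).foldl njA_step
      (0, (PySem.Dict.empty.insert (-1) (-1)).insert 0 0, PySem.Dict.empty)).2.2).items.map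
    (fun p => (p.1.1, p.1.2, p.2))

-- ===== PORT B =====
-- the relabel table of Source B: {-1: -1, 0: 0} plus v ↦ i+1 for i, v in enumerate(vs)
def njTable (vs : List Int) : PySem.Dict Int Int :=
  (PySem.List.enumerate vs 0).foldl (fun t p => t.insert p.2 (p.1 + 1))
    ((PySem.Dict.empty.insert (-1) (-1)).insert 0 0)

def normalise_joints_py_alt (pooling : List (Int × Int × List (Int × Int))) : List (Int × Int × List (Int × Int)) :=
  let table := njTable (PySem.List.sorted
    (PySem.Set.ofList (pooling.filterMap (fun e => if e.2.1 > 0 then some e.2.1 else none)))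
    (fun v => v) false)
  (((PySem.List.sorted pooling (fun x => x.2.1) false).foldl
      (fun out e => out.insert ((table.get? e.1).getD 0, (table.get? e.2.1).getD 0) e.2.2)
      PySem.Dict.empty).items).map (fun p => (p.1.1, p.1.2, p.2))

-- ===== PRECONDITION & SPEC =====
-- Pre_ excludes (a) the inputs on which A raises KeyError (a second joint below -1, or a first
-- joint that is neither -1, 0 nor the second joint of an edge sorting no later than its own),
-- and (b) poolings where two edges share the same positive second joint, a corner on which A's
-- incremental relabelling hands one joint several successive indices while B gives it a single
-- rank index — both readings are defensible and neither is specified.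
def Pre_normalise_joints_py (pooling : List (Int × Int × List (Int × Int))) : Prop :=
  pooling.Pairwise (fun x y => x.2.1 = y.2.1 → x.2.1 ≤ 0) ∧
  ∀ e ∈ pooling, (-1 ≤ e.2.1) ∧
    (e.1 = -1 ∨ e.1 = 0 ∨ (0 < e.1 ∧ ∃ e' ∈ pooling, e'.2.1 = e.1 ∧ e.1 ≤ e.2.1))
instance (pooling : List (Int × Int × List (Int × Int))) : Decidable (Pre_normalise_joints_py pooling) := by
  unfold Pre_normalise_joints_py; infer_instance

def pvWitness_normalise_joints_py : (List (Int × Int × List (Int × Int))) :=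
  [(0, 2, [(1, 2)]), (2, 3, []), (-1, 1, [])]

def Spec_normalise_joints_py (pooling : List (Int × Int × List (Int × Int))) (out : List (Int × Int × List (Int × Int))) : Prop :=
  out = normalise_joints_py_alt pooling
instance (pooling : List (Int × Int × List (Int × Int))) (out : List (Int × Int × List (Int × Int))) : Decidable (Spec_normalise_joints_py pooling out) := by
  unfold Spec_normalise_joints_py; infer_instance

-- ===== CLAIM (what is proved, stated in full; the proofs are below) =====
def Claim_equal_normalise_joints_py : Prop := ∀ (pooling : List (Int × Int × List (Int × Int))), Dom_normalise_joints_py pooling → Pre_normalise_joints_py pooling → Spec_normalise_joints_py pooling (normalise_joints_py pooling)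

-- ===== LEMMAS AND PROOFS =====

-- the positive second joints of a list of edges, in their order
def njPos (l : List (Int × Int × List (Int × Int))) : List Int :=
  l.filterMap (fun e => if e.2.1 > 0 then some e.2.1 else none)

lemma njTable_snoc (l : List Int) (x : Int) :
    njTable (l ++ [x]) = (njTable l).insert x ((l.length : Int) + 1) := by
  unfold njTable
  rw [PySem.List.enumerate_append, List.foldl_append]
  simp [PySem.List.enumerate_cons]

-- a table lookup of a key of l1 (or a preset key) ignores a positive-keyed extension l2 ∖ l1
lemma njTable_prefix (l1 l2 : List Int) (k : Int)
    (hk : k ∈ l1 ∨ k = -1 ∨ k = 0) (h2 : ∀ x ∈ l2, 0 < x ∧ x ∉ l1) :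
    (njTable (l1 ++ l2)).get? k = (njTable l1).get? k := by
  induction l2 using List.reverseRecOn with
  | nil => simp
  | append_singleton l2' x ih =>
    rw [← List.append_assoc, njTable_snoc, PySem.Dict.get?_insert_of_ne]
    · exact ih (fun y hy => h2 y (by simp [hy]))
    · have hx := h2 x (by simp)
      rcases hk with h | h | h
      · exact fun he => hx.2 (he ▸ h)
      · omega
      · omega

-- a strictly increasing list of integers in (0, v) is shorter than v
lemma njChainLen (v : Int) (hv : 0 < v) (l : List Int)
    (hp : l.Pairwise (· < ·)) (hm : ∀ x ∈ l, 0 < x ∧ x < v) :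
    (l.length : Int) < v := by
  have hnd : l.Nodup := hp.nodup
  have hsub : l.toFinset ⊆ Finset.Ioo (0 : Int) v := by
    intro x hx
    have := hm x (List.mem_toFinset.mp hx)
    simp only [Finset.mem_Ioo]; omega
  have hc := Finset.card_le_card hsub
  rw [List.toFinset_card_of_nodup hnd, Int.card_Ioo] at hc
  omega

lemma mem_njPos {l : List (Int × Int × List (Int × Int))} {x : Int} :
    x ∈ njPos l ↔ ∃ e ∈ l, 0 < e.2.1 ∧ e.2.1 = x := by
  simp only [njPos, List.mem_filterMap]
  constructor
  · rintro ⟨e, he, hx⟩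
    by_cases h : e.2.1 > 0
    · rw [if_pos h] at hx; exact ⟨e, he, h, Option.some_injective _ hx⟩
    · rw [if_neg h] at hx; cases hx
  · rintro ⟨e, he, h, rfl⟩; exact ⟨e, he, by rw [if_pos h]⟩

-- loop invariant: after a processed prefix `pre` of the sorted edge list, A's state is
-- ((njPos pre).length, njTable (njPos pre)), and the remaining loop inserts exactly what
-- B's single remapping pass with the full table njTable (njPos full) inserts.
lemma njMain (full : List (Int × Int × List (Int × Int)))
    (Hsort : full.Pairwise (fun x y => x.2.1 ≤ y.2.1))
    (Hdup : full.Pairwise (fun x y => x.2.1 = y.2.1 → x.2.1 ≤ 0))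
    (Hpre : ∀ e ∈ full, (-1 ≤ e.2.1) ∧
      (e.1 = -1 ∨ e.1 = 0 ∨ (0 < e.1 ∧ ∃ e' ∈ full, e'.2.1 = e.1 ∧ e.1 ≤ e.2.1))) :
    ∀ (suf pre : List (Int × Int × List (Int × Int)))
      (out : PySem.Dict (Int × Int) (List (Int × Int))), full = pre ++ suf →
      (suf.foldl njA_step (((njPos pre).length : Int), njTable (njPos pre), out)).2.2
        = suf.foldl (fun o e =>
            o.insert (((njTable (njPos full)).get? e.1).getD 0,
                      ((njTable (njPos full)).get? e.2.1).getD 0) e.2.2) out := by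
  intro suf
  induction suf with
  | nil => intro pre out h; rfl
  | cons e suf' ih =>
    intro pre out h
    have h' : full = (pre ++ [e]) ++ suf' := by rw [h]; simp
    have Hd1 := (List.pairwise_append.mp (h' ▸ Hdup)).2.2
    have Hs0 := (List.pairwise_append.mp (h ▸ Hsort)).2.2
    have Hd0 := (List.pairwise_append.mp (h ▸ Hdup)).2.2
    have Hsuf := (List.pairwise_append.mp (h ▸ Hsort)).2.1
    have hposlt : ∀ x ∈ njPos pre, 0 < x ∧ (0 < e.2.1 → x < e.2.1) := by
      intro x hx
      rcases mem_njPos.mp hx with ⟨g, hg, hgpos, rfl⟩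
      refine ⟨hgpos, fun hbe => ?_⟩
      have h1 := Hs0 g hg e (by simp)
      have h2 := Hd0 g hg e (by simp)
      omega
    -- the state update of this step reaches the table of njPos (pre ++ [e])
    have hstep : njA_step (((njPos pre).length : Int), njTable (njPos pre), out) e
        = (((njPos (pre ++ [e])).length : Int), njTable (njPos (pre ++ [e])),
           out.insert (((njTable (njPos (pre ++ [e]))).get? e.1).getD 0,
                       ((njTable (njPos (pre ++ [e]))).get? e.2.1).getD 0) e.2.2) := by
      by_cases hb : 0 < e.2.1
      · have hsnoc : njPos (pre ++ [e]) = njPos pre ++ [e.2.1] := by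
          simp [njPos, List.filterMap_append, hb]
        have hchain : (njPos pre).Pairwise (· < ·) := by
          have hs := (List.pairwise_append.mp (h ▸ Hsort)).1
          have hd := (List.pairwise_append.mp (h ▸ Hdup)).1
          exact (hs.and hd).filterMap _ (by
            rintro a a' ⟨hle, hdu⟩ b hbs b' hbs'
            by_cases ha : a.2.1 > 0 <;> by_cases ha' : a'.2.1 > 0 <;>
              simp [ha, ha'] at hbs hbs'
            subst hbs; subst hbs'; omega)
        have hgt : e.2.1 > ((njPos pre).length : Int) :=
          njChainLen e.2.1 hb _ hchain (fun x hx =>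
            ⟨(hposlt x hx).1, (hposlt x hx).2 hb⟩)
        simp only [njA_step, if_pos hgt, hsnoc, njTable_snoc, List.length_append,
          List.length_cons, List.length_nil]
        push_cast
        ring_nf
      · have hngt : ¬ (e.2.1 > ((njPos pre).length : Int)) := by
          have : (0:Int) ≤ ((njPos pre).length : Int) := Int.natCast_nonneg _
          omega
        have hsame : njPos (pre ++ [e]) = njPos pre := by
          simp [njPos, List.filterMap_append, hb]
        simp only [njA_step, if_neg hngt, hsame]
    -- this step's two lookups agree between the prefix table and the full table
    have hfullsplit : njPos full = njPos (pre ++ [e]) ++ njPos suf' := by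
      rw [h']; simp [njPos, List.filterMap_append]
    have h2 : ∀ x ∈ njPos suf', 0 < x ∧ x ∉ njPos (pre ++ [e]) := by
      intro x hx
      rcases mem_njPos.mp hx with ⟨f, hf, hfpos, rfl⟩
      refine ⟨hfpos, fun hxin => ?_⟩
      rcases mem_njPos.mp hxin with ⟨g, hg, hgpos, hge⟩
      have := Hd1 g hg f hf
      omega
    have hget : ∀ j : Int, (j ∈ njPos (pre ++ [e]) ∨ j = -1 ∨ j = 0) →
        (njTable (njPos full)).get? j = (njTable (njPos (pre ++ [e]))).get? j := by
      intro j hj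
      rw [hfullsplit]
      exact njTable_prefix _ _ _ hj h2
    have hkb : e.2.1 ∈ njPos (pre ++ [e]) ∨ e.2.1 = -1 ∨ e.2.1 = 0 := by
      by_cases hb : 0 < e.2.1
      · exact Or.inl (mem_njPos.mpr ⟨e, by simp, hb, rfl⟩)
      · have := (Hpre e (by rw [h]; simp)).1
        omega
    have hka : e.1 ∈ njPos (pre ++ [e]) ∨ e.1 = -1 ∨ e.1 = 0 := by
      rcases (Hpre e (by rw [h]; simp)).2 with ha | ha | ⟨hapos, e', he', heq, hle⟩
      · exact Or.inr (Or.inl ha)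
      · exact Or.inr (Or.inr ha)
      · left
        rw [h'] at he'
        rcases List.mem_append.mp he' with hin | hin
        · exact mem_njPos.mpr ⟨e', hin, heq ▸ hapos, heq⟩
        · have hge : e.2.1 ≤ e'.2.1 := (List.pairwise_cons.mp Hsuf).1 e' hin
          have : e.1 = e.2.1 := by omega
          exact mem_njPos.mpr ⟨e, by simp, by omega, this.symm⟩
    simp only [List.foldl_cons, hstep, hget e.1 hka, hget e.2.1 hkb]
    exact ih (pre ++ [e]) _ h'

-- ===== VERDICT (by name: the statement is the Claim_ definition above) =====
theorem normalise_joints_py_spec : Claim_equal_normalise_joints_py := by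
  intro pooling _hdom hpre
  unfold Spec_normalise_joints_py
  unfold Pre_normalise_joints_py at hpre
  obtain ⟨hP, hpre⟩ := hpre
  have hperm : (PySem.List.sorted pooling (fun x : Int × Int × List (Int × Int) => x.2.1) false).Perm pooling :=
    PySem.List.sorted_perm _ _ _
  set full := PySem.List.sorted pooling (fun x : Int × Int × List (Int × Int) => x.2.1) false with hfull
  have Hdup : full.Pairwise (fun x y => x.2.1 = y.2.1 → x.2.1 ≤ 0) := by
    refine (List.Perm.pairwise_iff ?_ hperm).mpr hP
    intro x y hxy he; have := hxy he.symm; omega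
  have Hsort : full.Pairwise (fun x y => x.2.1 ≤ y.2.1) := PySem.List.sorted_pairwise _ _
  have Hpre' : ∀ e ∈ full, (-1 ≤ e.2.1) ∧
      (e.1 = -1 ∨ e.1 = 0 ∨ (0 < e.1 ∧ ∃ e' ∈ full, e'.2.1 = e.1 ∧ e.1 ≤ e.2.1)) := by
    intro e he
    rcases hpre e (hperm.mem_iff.mp he) with ⟨h1, h2⟩
    refine ⟨h1, ?_⟩
    rcases h2 with h | h | ⟨ha, e', he', hq⟩
    · exact Or.inl h
    · exact Or.inr (Or.inl h)
    · exact Or.inr (Or.inr ⟨ha, e', hperm.mem_iff.mpr he', hq⟩)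
  -- the sorted deduplicated positive joints are exactly njPos full
  have hnd : (njPos pooling).Nodup := by
    have hne : (njPos pooling).Pairwise (· ≠ ·) := by
      apply hP.filterMap
      rintro a a' hr b hb b' hb'
      by_cases ha : a.2.1 > 0 <;> by_cases ha' : a'.2.1 > 0 <;> simp [ha, ha'] at hb hb'
      subst hb; subst hb'; intro hEq; exact absurd (hr hEq) (by omega)
    exact hne
  have hchain : (njPos full).Pairwise (· < ·) := by
    exact (Hsort.and Hdup).filterMap _ (by
      rintro a a' ⟨hle, hdu⟩ b hbs b' hbs'
      by_cases ha : a.2.1 > 0 <;> by_cases ha' : a'.2.1 > 0 <;> simp [ha, ha'] at hbs hbs'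
      subst hbs; subst hbs'; omega)
  have hpermpos : (njPos full).Perm (njPos pooling) := hperm.filterMap _
  have hsorted_eq : PySem.List.sorted (PySem.Set.ofList (njPos pooling)) (fun v => v) false = njPos full := by
    rw [PySem.Set.ofList_eq_self_of_nodup _ hnd]
    exact PySem.List.sorted_eq_of_perm_of_pairwise_lt _ _ _ hpermpos hchain
  have hmain := njMain full Hsort Hdup Hpre' full [] PySem.Dict.empty (by simp)
  simp only [njPos, List.filterMap_nil, List.length_nil, Nat.cast_zero] at hmain
  show (((full.foldl njA_step
      (0, (PySem.Dict.empty.insert (-1) (-1)).insert 0 0, PySem.Dict.empty)).2.2).items).map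
      (fun p => (p.1.1, p.1.2, p.2)) = _
  rw [show ((PySem.Dict.empty.insert (-1 : Int) (-1 : Int)).insert 0 0) = njTable [] from rfl, hmain]
  show _ = (((full.foldl (fun out e =>
      out.insert (((njTable (PySem.List.sorted (PySem.Set.ofList (njPos pooling)) (fun v => v) false)).get? e.1).getD 0,
                  ((njTable (PySem.List.sorted (PySem.Set.ofList (njPos pooling)) (fun v => v) false)).get? e.2.1).getD 0) e.2.2)
      PySem.Dict.empty).items).map (fun p => (p.1.1, p.1.2, p.2)))
  rw [hsorted_eq]
  simp only [njPos]
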